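-- pv_equiv track=rewrite | github.com/RascalTwo/DailyProblem | problems/LeetCode/valid-number/solve.py | last_valid_index
-- ===== SOURCE A (Python) =====
-- def last_valid_index(string: str, exponent: bool) -> int:
-- 	sign = False
-- 	digits = False
-- 	dot = not exponent
-- 	i = -1
-- 	for i, char in enumerate(string):
-- 		if char.isdigit():
-- 			digits = True
-- 			continue
-- 		elif char in '+-':
-- 			if sign or i:
-- 				return -1
-- 			sign = True
-- 			continue
-- 		elif char == '.':
-- 			if dot:
-- 				return -1
-- 			dot = True
-- 			continue
-- 		elif char in 'eE':
-- 			if not i or not exponent or not digits: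
-- 				return -1
-- 			result = last_valid_index(string[i + 1:], False)
-- 			if result == -1:
-- 				return -1
-- 			return i + 1 + result
-- 		return i - 1
-- 	return i if digits else -1
-- ===== SOURCE B (Python) =====
-- def _scan(s, allow_dot):
--     sign = digits = dot_seen = False
--     i = -1
--     for i, c in enumerate(s):
--         if c.isdigit():
--             digits = True
--         elif c in '+-':
--             if sign or i:
--                 return -1
--             sign = True
--         elif c == '.':
--             if not allow_dot or dot_seen:
--                 return -1
--             dot_seen = True
--         elif c in 'eE':
--             return -1
--         else:
--             return i - 1
--     return i if digits else -1
--
--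
-- def last_valid_index(string: str, exponent: bool) -> int:
--     p = next((i for i, c in enumerate(string) if c in 'eE'), -1)
--     if not exponent or p == -1:
--         return _scan(string, exponent)
--     if p == 0:
--         return -1
--     r1 = _scan(string[:p], True)
--     if r1 != p - 1:
--         return r1
--     r2 = _scan(string[p + 1:], False)
--     return -1 if r2 == -1 else p + 1 + r2
-- ===== Notes on version B (the rewrite author's own statement) =====
-- stated objective: alternative
-- what changed: A's single recursive state machine (which re-enters itself on the substring after 'e') is replaced by finding the first 'e'/'E' up front and validating the two halves with one shared non-recursive signed-number scanner, combining the results by offset.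
import Mathlib
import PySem

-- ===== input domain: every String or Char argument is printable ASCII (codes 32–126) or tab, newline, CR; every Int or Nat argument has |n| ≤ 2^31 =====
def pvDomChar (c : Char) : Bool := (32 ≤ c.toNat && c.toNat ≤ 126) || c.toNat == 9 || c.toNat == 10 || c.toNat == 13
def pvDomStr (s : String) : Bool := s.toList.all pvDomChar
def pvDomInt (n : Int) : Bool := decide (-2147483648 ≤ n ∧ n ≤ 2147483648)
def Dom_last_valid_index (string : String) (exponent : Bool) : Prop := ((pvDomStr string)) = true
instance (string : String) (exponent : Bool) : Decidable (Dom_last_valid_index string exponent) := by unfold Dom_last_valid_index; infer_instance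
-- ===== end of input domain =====

-- B replaces A's recursive state machine by a split at the first 'e'/'E' plus one shared
-- single-pass signed-number scanner used for both halves (objective: alternative decomposition).

-- ===== PORT A =====
-- A's for-loop with state (sign, digits, dot) and the recursive call on string[i+1:];
-- i is the index of the head of `cs` (Python's enumerate index).
def lviGo (exponent : Bool) (cs : List Char) (i : Int) (sign digits dot : Bool) : Int :=
  match cs with
  | [] => if digits then i - 1 else -1          -- Python: `return i if digits else -1` (its i = our i - 1)
  | c :: t =>
    if c.isDigit then lviGo exponent t (i + 1) sign true dot
    else if c = '+' ∨ c = '-' then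
      if sign ∨ i ≠ 0 then -1 else lviGo exponent t (i + 1) true digits dot
    else if c = '.' then
      if dot then -1 else lviGo exponent t (i + 1) sign digits true
    else if c = 'e' ∨ c = 'E' then
      if i = 0 ∨ exponent = false ∨ digits = false then -1
      else
        -- result = last_valid_index(string[i+1:], False); string[i+1:] is the tail t
        let result := lviGo false t 0 false false true
        if result = -1 then -1 else i + 1 + result
    else i - 1

def last_valid_index (string : String) (exponent : Bool) : Int :=
  lviGo exponent string.toList 0 false false (!exponent)

-- ===== PORT B =====
-- Source B's _scan loop: plain signed number, dot allowed at most once when allowDot, 'e'/'E' invalid.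
def scanGo (allowDot : Bool) (cs : List Char) (i : Int) (sign digits dotSeen : Bool) : Int :=
  match cs with
  | [] => if digits then i - 1 else -1
  | c :: t =>
    if c.isDigit then scanGo allowDot t (i + 1) sign true dotSeen
    else if c = '+' ∨ c = '-' then
      if sign ∨ i ≠ 0 then -1 else scanGo allowDot t (i + 1) true digits dotSeen
    else if c = '.' then
      if allowDot = false ∨ dotSeen then -1 else scanGo allowDot t (i + 1) sign digits true
    else if c = 'e' ∨ c = 'E' then -1
    else i - 1

def scanNum (s : List Char) (allowDot : Bool) : Int := scanGo allowDot s 0 false false false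

def last_valid_index_alt (string : String) (exponent : Bool) : Int :=
  let cs := string.toList
  match exponent, cs.findIdx? (fun c => c == 'e' || c == 'E') with
  | true, some p =>
    if p = 0 then -1
    else
      let r1 := scanNum (cs.take p) true
      if r1 ≠ (p : Int) - 1 then r1
      else
        let r2 := scanNum (cs.drop (p + 1)) false
        if r2 = -1 then -1 else (p : Int) + 1 + r2
  | _, _ => scanNum cs exponent

-- ===== PRECONDITION & SPEC =====
def Spec_last_valid_index (string : String) (exponent : Bool) (out : Int) : Prop := out = last_valid_index_alt string exponent
instance (string : String) (exponent : Bool) (out : Int) : Decidable (Spec_last_valid_index string exponent out) := by unfold Spec_last_valid_index; infer_instance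

-- ===== CLAIM (what is proved, stated in full; the proofs are below) =====
def Claim_equal_last_valid_index : Prop := ∀ (string : String) (exponent : Bool), Dom_last_valid_index string exponent → Spec_last_valid_index string exponent (last_valid_index string exponent)

-- ===== LEMMAS AND PROOFS =====

-- With exponent = False, A's dot flag starts (and stays) true so any '.' returns -1,
-- and 'e'/'E' returns -1; that is exactly scanGo with allowDot = false (any dotSeen).
theorem lviGo_false_eq_scanGo (cs : List Char) :
    ∀ (i : Int) (sign digits d : Bool),
      lviGo false cs i sign digits true = scanGo false cs i sign digits d := by
  induction cs with
  | nil => intro i sign digits d; rfl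
  | cons c t ih =>
    intro i sign digits d
    simp only [lviGo, scanGo]
    split_ifs with h1 h2 h3 h4 h5 <;> first | rfl | (apply ih) | (simp_all)

-- The combined shape of B, generalized over A's loop state; i + p is the global index of the 'e'.
def rhsG (cs : List Char) (i : Int) (sign digits dot : Bool) : Int :=
  match cs.findIdx? (fun c => c == 'e' || c == 'E') with
  | none => scanGo true cs i sign digits dot
  | some p =>
    if i + p = 0 then -1
    else
      let r1 := scanGo true (cs.take p) i sign digits dot
      if r1 ≠ i + p - 1 then r1
      else
        let r2 := scanGo false (cs.drop (p + 1)) 0 false false false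
        if r2 = -1 then -1 else i + p + 1 + r2

-- One loop step of B's combined shape: if c is not an exponent marker and the scanner makes
-- the same state transition on c, rhsG steps with it.
theorem rhsG_cons_step (c : Char) (t : List Char) (i : Int) (sign digits dot s' d' dt' : Bool)
    (hnotE : (c == 'e' || c == 'E') = false)
    (hscan : ∀ (l : List Char), scanGo true (c :: l) i sign digits dot = scanGo true l (i + 1) s' d' dt') :
    rhsG (c :: t) i sign digits dot = rhsG t (i + 1) s' d' dt' := by
  unfold rhsG
  rw [List.findIdx?_cons, hnotE]
  simp only [Bool.false_eq_true, if_false]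
  cases ht : t.findIdx? (fun c => c == 'e' || c == 'E') with
  | none => simp only [Option.map_none, hscan t]
  | some p =>
    simp only [Option.map_some, List.take_succ_cons, List.drop_succ_cons, hscan]
    have e0 : i + ((p + 1 : Nat) : Int) = i + 1 + (p : Int) := by push_cast; ring
    rw [e0]
  -- If the scanner exits immediately on c with a value below i, so does rhsG.
theorem rhsG_cons_const (c : Char) (t : List Char) (i : Int) (sign digits dot : Bool) (v : Int)
    (hnotE : (c == 'e' || c == 'E') = false)
    (hscan : ∀ (l : List Char), scanGo true (c :: l) i sign digits dot = v)
    (hv : v < i) (hi : 0 ≤ i) :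
    rhsG (c :: t) i sign digits dot = v := by
  unfold rhsG
  rw [List.findIdx?_cons, hnotE]
  simp only [Bool.false_eq_true, if_false]
  cases ht : t.findIdx? (fun c => c == 'e' || c == 'E') with
  | none => simp only [Option.map_none, hscan t]
  | some p =>
    simp only [Option.map_some, List.take_succ_cons, hscan]
    have h0 : ¬ (i + ((p : Int) + 1) = 0) := by omega
    have h1 : ¬ (v = i + ((p : Int) + 1) - 1) := by omega
    simp [h0, h1]

theorem lviGo_true_eq_rhsG (cs : List Char) :
    ∀ (i : Int) (sign digits dot : Bool), 0 ≤ i →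
      lviGo true cs i sign digits dot = rhsG cs i sign digits dot := by
  induction cs with
  | nil => intro i sign digits dot hi; rfl
  | cons c t ih =>
    intro i sign digits dot hi
    by_cases hE : c = 'e' ∨ c = 'E'
    · have hD : c.isDigit = false := by rcases hE with h | h <;> subst h <;> decide
      have hS : ¬ (c = '+' ∨ c = '-') := by rcases hE with h | h <;> subst h <;> decide
      have hDot : c ≠ '.' := by rcases hE with h | h <;> subst h <;> decide
      have hf : (c :: t).findIdx? (fun c => c == 'e' || c == 'E') = some 0 := by
        rcases hE with h | h <;> subst h <;> simp [List.findIdx?_cons]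
      unfold lviGo rhsG
      rw [hf]
      simp only [hD, Bool.false_eq_true, if_false, if_neg hS, if_neg hDot, if_pos hE,
        Nat.cast_zero, add_zero, List.take_zero, List.drop_succ_cons, List.drop_zero]
      by_cases hi0 : i = 0
      · simp [hi0]
      · cases digits with
        | false =>
          have hne : ¬ ((-1 : Int) = i - 1) := by omega
          simp [hi0, hne, scanGo]
        | true =>
          have hr : lviGo false t 0 false false true = scanGo false t 0 false false false :=
            lviGo_false_eq_scanGo t 0 false false false
          simp [hi0, hr, scanGo]
    · have hnotE : (c == 'e' || c == 'E') = false := by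
        rcases not_or.mp hE with ⟨h1, h2⟩; simp [h1, h2]
      by_cases hD : c.isDigit
      · rw [show lviGo true (c :: t) i sign digits dot = lviGo true t (i + 1) sign true dot by
          simp [lviGo, hD]]
        rw [rhsG_cons_step c t i sign digits dot sign true dot hnotE
          (fun l => by simp [scanGo, hD])]
        exact ih (i + 1) sign true dot (by omega)
      · by_cases hS : c = '+' ∨ c = '-'
        · by_cases hG : sign ∨ i ≠ 0
          · rw [show lviGo true (c :: t) i sign digits dot = -1 by simp [lviGo, hD, hS, hG]]
            rw [rhsG_cons_const c t i sign digits dot (-1) hnotE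
              (fun l => by simp [scanGo, hD, hS, hG]) (by omega) hi]
          · rw [show lviGo true (c :: t) i sign digits dot = lviGo true t (i + 1) true digits dot by
              simp [lviGo, hD, hS, hG]]
            rw [rhsG_cons_step c t i sign digits dot true digits dot hnotE
              (fun l => by simp [scanGo, hD, hS, hG])]
            exact ih (i + 1) true digits dot (by omega)
        · by_cases hDot : c = '.'
          · cases dot with
            | true =>
              rw [show lviGo true (c :: t) i sign digits true = -1 by simp [lviGo, hDot]]
              rw [rhsG_cons_const c t i sign digits true (-1) hnotE
                (fun l => by simp [scanGo, hDot]) (by omega) hi]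
            | false =>
              rw [show lviGo true (c :: t) i sign digits false
                  = lviGo true t (i + 1) sign digits true by simp [lviGo, hDot]]
              rw [rhsG_cons_step c t i sign digits false sign digits true hnotE
                (fun l => by simp [scanGo, hDot])]
              exact ih (i + 1) sign digits true (by omega)
          · have hE' : ¬ (c = 'e' ∨ c = 'E') := hE
            rw [show lviGo true (c :: t) i sign digits dot = i - 1 by
              simp [lviGo, hD, hS, hDot, hE']]
            rw [rhsG_cons_const c t i sign digits dot (i - 1) hnotE
              (fun l => by simp [scanGo, hD, hS, hDot, hE']) (by omega) hi]

-- ===== VERDICT (by name: the statement is the Claim_ definition above) =====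
theorem last_valid_index_spec : Claim_equal_last_valid_index := by
  intro string exponent _
  unfold Spec_last_valid_index last_valid_index last_valid_index_alt
  cases exponent with
  | false =>
    simp only [Bool.not_false, scanNum]
    exact lviGo_false_eq_scanGo string.toList 0 false false false
  | true =>
    rw [show (!true) = false from rfl, lviGo_true_eq_rhsG string.toList 0 false false false
      (by omega)]
    unfold rhsG
    cases h : string.toList.findIdx? (fun c => c == 'e' || c == 'E') with
    | none => simp [h, scanNum]
    | some p => simp [h, scanNum]
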